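-- pv_equiv track=rewrite | github.com/satoshikawato/gbdraw | tools/tailwind/bin/tailwindcss_stub.py | split_variants
-- ===== SOURCE A (Python) =====
-- VARIANTS = {"hover", "focus", "active", "disabled", "group-hover"}
--
-- def split_variants(token: str) -> tuple[list[str], str]:
--     variants: list[str] = []
--     rest = token
--     while ":" in rest:
--         prefix, remainder = rest.split(":", 1)
--         if prefix not in VARIANTS:
--             break
--         variants.append(prefix)
--         rest = remainder
--     return variants, rest
-- ===== SOURCE B (Python) =====
-- VARIANTS = {"hover", "focus", "active", "disabled", "group-hover"}
--
--
-- def split_variants(token: str) -> tuple[list[str], str]: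
--     # Split once into segments, then strip known-variant segments off the front,
--     # never consuming the final segment; rejoin the remainder.
--     parts = token.split(':')
--     variants = []
--     while len(parts) >= 2 and parts[0] in VARIANTS:
--         variants.append(parts[0])
--         parts = parts[1:]
--     return variants, ':'.join(parts)
-- ===== Notes on version B (the rewrite author's own statement) =====
-- stated objective: idiomatic
-- what changed: B splits the token into its ':'-segments once and strips known-variant segments off the front of the segment list, then rejoins the remainder, instead of repeatedly re-splitting the remaining string with split(':', 1).
import Mathlib
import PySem

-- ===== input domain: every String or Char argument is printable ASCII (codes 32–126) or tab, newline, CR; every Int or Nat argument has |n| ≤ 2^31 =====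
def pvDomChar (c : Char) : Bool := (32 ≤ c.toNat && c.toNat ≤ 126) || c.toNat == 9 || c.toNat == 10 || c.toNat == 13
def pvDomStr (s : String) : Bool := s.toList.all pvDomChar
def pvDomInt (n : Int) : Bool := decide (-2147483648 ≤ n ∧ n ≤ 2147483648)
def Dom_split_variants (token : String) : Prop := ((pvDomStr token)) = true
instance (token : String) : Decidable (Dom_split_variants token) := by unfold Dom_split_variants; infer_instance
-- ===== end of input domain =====

-- B splits the token into its ':'-segments once and walks the segment list, instead of
-- re-splitting the remaining string each iteration (objective: idiomatic; not faster).

-- the module constant VARIANTS (a Python set)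
def pvVARIANTS : PySem.Set String :=
  PySem.Set.ofList ["hover", "focus", "active", "disabled", "group-hover"]

-- ===== PORT A =====
-- A's while loop; strings are modeled by their code-point lists (exact).  The fuel
-- argument only makes the loop total: rest.length + 1 always suffices (proved below).
def splitVariantsLoop : Nat → List String → List Char → List String × List Char
  | 0, variants, rest => (variants, rest)
  | fuel + 1, variants, rest =>
    if PySem.Chars.isIn [':'] rest then                      -- while ":" in rest
      match PySem.Chars.splitOnMax rest [':'] 1 with         -- rest.split(":", 1)
      | [pre, rem] =>
        if PySem.Set.contains pvVARIANTS (String.ofList pre) then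
          splitVariantsLoop fuel (variants ++ [String.ofList pre]) rem
        else (variants, rest)                                -- break
      | _ => (variants, rest)                                -- unreachable: split(":",1) with ":" in rest has 2 parts
    else (variants, rest)

def split_variants (token : String) : List String × String :=
  let r := splitVariantsLoop (token.toList.length + 1) [] token.toList
  (r.1, String.ofList r.2)

-- ===== PORT B =====
-- Source B's while loop: strip known-variant segments off the front of the segment list
def stripLoop : List String → List String → List String × List String
  | variants, p :: q :: rest =>                              -- len(parts) >= 2
    if PySem.Set.contains pvVARIANTS p then                  -- parts[0] in VARIANTS
      stripLoop (variants ++ [p]) (q :: rest)                -- append parts[0]; parts = parts[1:]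
    else (variants, p :: q :: rest)
  | variants, parts => (variants, parts)

def split_variants_alt (token : String) : List String × String :=
  let parts := (PySem.Chars.splitOn token.toList [':']).map String.ofList   -- token.split(':')
  let r := stripLoop [] parts
  (r.1, PySem.Str.join ":" r.2)                              -- ':'.join(parts)

-- ===== PRECONDITION & SPEC =====
def Spec_split_variants (token : String) (out : List String × String) : Prop := out = split_variants_alt token
instance (token : String) (out : List String × String) : Decidable (Spec_split_variants token out) := by unfold Spec_split_variants; infer_instance

-- ===== CLAIM (what is proved, stated in full; the proofs are below) =====
def Claim_equal_split_variants : Prop := ∀ (token : String), Dom_split_variants token → Spec_split_variants token (split_variants token)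

-- ===== LEMMAS AND PROOFS =====

-- the ':'-segments of a character list (proof-side characterisation of token.split(':'))
def pvPieces : List Char → List (List Char)
  | [] => [[]]
  | c :: rest => if c = ':' then [] :: pvPieces rest else (pvPieces rest).modifyHead (c :: ·)

theorem pvPieces_ne_nil (l : List Char) : pvPieces l ≠ [] := by
  induction l with
  | nil => simp [pvPieces]
  | cons c rest ih =>
    simp only [pvPieces]
    split_ifs
    · simp
    · cases h : pvPieces rest with
      | nil => exact absurd h ih
      | cons a t => simp [List.modifyHead]

theorem splitOn_go_spec (fuel : Nat) (l cur : List Char) (acc2 : List (List Char))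
    (h : l.length ≤ fuel) :
    PySem.Chars.splitOn.go [':'] fuel l cur acc2 =
      acc2.reverse ++ (pvPieces l).modifyHead (cur.reverse ++ ·) := by
  induction fuel generalizing l cur acc2 with
  | zero =>
    interval_cases hl : l.length
    all_goals cases l with
    | nil => simp [PySem.Chars.splitOn.go, pvPieces, List.modifyHead]
    | cons c rest => simp at hl
  | succ fuel ih =>
    cases l with
    | nil => simp [PySem.Chars.splitOn.go, pvPieces, List.modifyHead]
    | cons c rest =>
      simp only [PySem.Chars.splitOn.go]
      by_cases hc : c = ':'
      · subst hc
        have hpre : List.isPrefixOf [':'] (':' :: rest) = true := by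
          simp [List.isPrefixOf]
        rw [if_pos hpre]
        simp only [List.length_cons, List.length_nil, List.drop_succ_cons, List.drop_zero]
        rw [ih rest [] ((cur.reverse) :: acc2) (by simpa using Nat.le_of_succ_le_succ h)]
        cases hp : pvPieces rest with
        | nil => exact absurd hp (pvPieces_ne_nil rest)
        | cons a t => simp [pvPieces, hp, List.modifyHead]
      · have hpre : List.isPrefixOf [':'] (c :: rest) = false := by
          simp [List.isPrefixOf]
          intro hcc; exact absurd hcc.symm hc
        rw [if_neg (by simp [hpre])]
        rw [ih rest (c :: cur) acc2 (by simpa using Nat.le_of_succ_le_succ h)]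
        cases hp : pvPieces rest with
        | nil => exact absurd hp (pvPieces_ne_nil rest)
        | cons a t => simp [pvPieces, hp, List.modifyHead, hc]

theorem splitOn_eq_pvPieces (l : List Char) :
    PySem.Chars.splitOn l [':'] = pvPieces l := by
  unfold PySem.Chars.splitOn
  rw [splitOn_go_spec (l.length + 1) l [] [] (Nat.le_succ _)]
  cases hp : pvPieces l with
  | nil => exact absurd hp (pvPieces_ne_nil l)
  | cons a t => simp [List.modifyHead]

theorem splitOnMax_go_zero (fuel : Nat) (l cur : List Char) (acc : List (List Char)) :
    PySem.Chars.splitOnMax.go [':'] fuel 0 l cur acc =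
      acc.reverse ++ [cur.reverse ++ l] := by
  cases fuel with
  | zero => simp [PySem.Chars.splitOnMax.go]
  | succ fuel =>
    cases l with
    | nil => simp [PySem.Chars.splitOnMax.go]
    | cons c rest => simp [PySem.Chars.splitOnMax.go]

theorem splitOnMax_go_one (fuel : Nat) (l cur : List Char) (acc : List (List Char))
    (h : l.length ≤ fuel) :
    PySem.Chars.splitOnMax.go [':'] fuel 1 l cur acc =
      acc.reverse ++
        (if ':' ∈ l then [cur.reverse ++ l.takeWhile (· ≠ ':'), (l.dropWhile (· ≠ ':')).tail]
         else [cur.reverse ++ l]) := by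
  induction fuel generalizing l cur acc with
  | zero =>
    interval_cases hl : l.length
    all_goals cases l with
    | nil => simp [PySem.Chars.splitOnMax.go]
    | cons c rest => simp at hl
  | succ fuel ih =>
    cases l with
    | nil => simp [PySem.Chars.splitOnMax.go]
    | cons c rest =>
      simp only [PySem.Chars.splitOnMax.go]
      rw [if_neg (by omega)]
      by_cases hc : c = ':'
      · subst hc
        have hpre : List.isPrefixOf [':'] (':' :: rest) = true := by
          simp [List.isPrefixOf]
        rw [if_pos hpre]
        simp only [List.length_cons, List.drop_succ_cons]
        rw [splitOnMax_go_zero]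
        simp [List.takeWhile, List.dropWhile]
      · have hpre : List.isPrefixOf [':'] (c :: rest) = false := by
          simp [List.isPrefixOf]
          intro hcc; exact absurd hcc.symm hc
        rw [if_neg (by simp [hpre])]
        rw [ih rest (c :: cur) acc (by simpa using Nat.le_of_succ_le_succ h)]
        by_cases hm : ':' ∈ rest
        · simp [hm, hc, List.takeWhile, List.dropWhile]
        · simp [hm, Ne.symm hc]

theorem isIn_colon_iff (l : List Char) :
    PySem.Chars.isIn [':'] l = true ↔ ':' ∈ l := by
  rw [PySem.Chars.isIn_iff_infix]
  constructor
  · intro h; exact h.mem (by simp)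
  · intro h
    obtain ⟨a, b, rfl⟩ := List.mem_iff_append.mp h
    exact ⟨a, b, by simp⟩

theorem splitOnMax_one_of_mem (l : List Char) (h : ':' ∈ l) :
    PySem.Chars.splitOnMax l [':'] 1 =
      [l.takeWhile (· ≠ ':'), (l.dropWhile (· ≠ ':')).tail] := by
  unfold PySem.Chars.splitOnMax
  rw [if_neg (by omega)]
  simp only [Int.toNat_one]
  rw [splitOnMax_go_one (l.length + 1) l [] [] (Nat.le_succ _)]
  simp [h]

theorem pvPieces_of_not_mem (l : List Char) (h : ':' ∉ l) : pvPieces l = [l] := by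
  induction l with
  | nil => simp [pvPieces]
  | cons c rest ih =>
    simp only [List.mem_cons, not_or] at h
    simp [pvPieces, Ne.symm h.1, ih h.2, List.modifyHead]

theorem pvPieces_decomp (l : List Char) (h : ':' ∈ l) :
    pvPieces l = l.takeWhile (· ≠ ':') :: pvPieces ((l.dropWhile (· ≠ ':')).tail) := by
  induction l with
  | nil => simp at h
  | cons c rest ih =>
    by_cases hc : c = ':'
    · subst hc; simp [pvPieces, List.takeWhile, List.dropWhile]
    · have hm : ':' ∈ rest := by
        rcases List.mem_cons.mp h with h1 | h1
        · exact absurd h1.symm hc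
        · exact h1
      rw [pvPieces, if_neg hc, ih hm]
      simp [List.takeWhile, List.dropWhile, hc, List.modifyHead]

theorem join_pvPieces (l : List Char) :
    PySem.Chars.join [':'] (pvPieces l) = l := by
  induction l with
  | nil => simp [pvPieces, PySem.Chars.join, List.intercalate]
  | cons c rest ih =>
    by_cases hc : c = ':'
    · subst hc
      cases hp : pvPieces rest with
      | nil => exact absurd hp (pvPieces_ne_nil rest)
      | cons a t =>
        rw [hp] at ih
        simp only [pvPieces, hp]
        simp only [PySem.Chars.join, List.intercalate] at *
        simp at *
        simpa using ih
    · cases hp : pvPieces rest with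
      | nil => exact absurd hp (pvPieces_ne_nil rest)
      | cons a t =>
        rw [hp] at ih
        simp only [pvPieces, if_neg hc, hp, List.modifyHead]
        simp only [PySem.Chars.join, List.intercalate] at *
        cases t with
        | nil => simpa using ih
        | cons b t' => simp_all [List.intersperse]

theorem dropWhile_tail_length_lt (l : List Char) (h : ':' ∈ l) :
    ((l.dropWhile (· ≠ ':')).tail).length < l.length := by
  cases hd : l.dropWhile (· ≠ ':') with
  | nil =>
    exfalso
    have heq : l.takeWhile (· ≠ ':') = l := by
      have h4 := List.takeWhile_append_dropWhile (p := (· ≠ ':')) (l := l)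
      rw [hd] at h4; simpa using h4
    have h5 : ':' ∈ l.takeWhile (· ≠ ':') := by rw [heq]; exact h
    have h6 := List.mem_takeWhile_imp h5
    simp at h6
  | cons a t =>
    have h2 := List.length_dropWhile_le (p := (· ≠ ':')) (l := l)
    rw [hd] at h2
    simp only [List.tail_cons]
    simp only [List.length_cons] at h2
    omega

-- main loop correspondence: A's string loop = B's segment-list loop on the pieces
theorem loop_correspondence (fuel : Nat) :
    ∀ (l : List Char) (variants : List String), l.length < fuel →
      splitVariantsLoop fuel variants l =
        ((stripLoop variants ((pvPieces l).map String.ofList)).1,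
         PySem.Chars.join [':']
           (((stripLoop variants ((pvPieces l).map String.ofList)).2).map String.toList)) := by
  induction fuel with
  | zero => intro l variants h; omega
  | succ fuel ih =>
    intro l variants h
    by_cases hm : ':' ∈ l
    · have hin : PySem.Chars.isIn [':'] l = true := (isIn_colon_iff l).mpr hm
      have hsplit := splitOnMax_one_of_mem l hm
      have hdec := pvPieces_decomp l hm
      set t := l.takeWhile (· ≠ ':') with ht
      set d := (l.dropWhile (· ≠ ':')).tail with hd
      simp only [splitVariantsLoop, hin, if_pos, hsplit]
      cases hp : pvPieces d with
      | nil => exact absurd hp (pvPieces_ne_nil d)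
      | cons a tl =>
        have hparts : (pvPieces l).map String.ofList =
            String.ofList t :: String.ofList a :: tl.map String.ofList := by
          rw [hdec, hp]; simp
        rw [hparts]
        by_cases hv : PySem.Set.contains pvVARIANTS (String.ofList t) = true
        · rw [if_pos hv]
          simp only [stripLoop, hv, if_pos]
          have hlen : d.length < fuel := by
            have hlt := dropWhile_tail_length_lt l hm
            rw [← hd] at hlt
            omega
          rw [ih d (variants ++ [String.ofList t]) hlen]
          rw [hp]; simp
        · rw [if_neg hv]
          simp only [stripLoop, hv]
          simp only [Bool.false_eq_true, if_false]
          have : PySem.Chars.join [':']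
              ((String.ofList t :: String.ofList a :: tl.map String.ofList).map String.toList) = l := by
            have : (String.ofList t :: String.ofList a :: tl.map String.ofList).map String.toList
                = pvPieces l := by
              rw [hdec, hp]
              simp [List.map_map, Function.comp_def]
            rw [this, join_pvPieces]
          rw [this]
    · have hin : PySem.Chars.isIn [':'] l = false := by
        cases hb : PySem.Chars.isIn [':'] l
        · rfl
        · exact absurd ((isIn_colon_iff l).mp hb) hm
      simp only [splitVariantsLoop, hin, Bool.false_eq_true, if_false]
      rw [pvPieces_of_not_mem l hm]
      simp [stripLoop]

-- ===== VERDICT (by name: the statement is the Claim_ definition above) =====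
theorem split_variants_spec : Claim_equal_split_variants := by
  unfold Claim_equal_split_variants
  intro token _
  unfold Spec_split_variants split_variants split_variants_alt
  rw [loop_correspondence (token.toList.length + 1) token.toList [] (Nat.lt_succ_self _)]
  rw [splitOn_eq_pvPieces]
  simp only [PySem.Str.join]
  constructor
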